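-- pv_equiv track=rewrite | github.com/Jasraj-Jassar/turbo_apply | processor.py | _filter_company_words
-- ===== SOURCE A (Python) =====
-- def _filter_company_words(words: list, max_words: int = 6) -> list:
--     filtered = []
--     for word in words:
--         if _is_noise_word(word):
--             if filtered:
--                 break
--             continue
--         filtered.append(word)
--         if len(filtered) >= max_words:
--             break
--     return filtered
--
-- def _is_noise_word(word: str) -> bool:
--     lower = word.lower()
--     if lower in {"true", "false"}:
--         return True
--     if lower.startswith("css"):
--         return True
--     if lower in {
--         "webkit",
--         "ms",
--         "inline",
--         "block",
--         "flex",
--         "display",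
--         "margin",
--         "padding",
--         "size",
--         "color",
--         "inherit",
--         "vertical",
--         "align",
--         "start",
--         "end",
--         "auto",
--         "rem",
--         "em",
--         "px",
--     }:
--         return True
--     if len(word) > 24:
--         return True
--     if len(word) > 4 and any(ch.isdigit() for ch in word) and any(
--         ch.isalpha() for ch in word
--     ):
--         return True
--     return False
-- ===== SOURCE B (Python) =====
-- NOISE_SET = {
--     "webkit", "ms", "inline", "block", "flex", "display", "margin",
--     "padding", "size", "color", "inherit", "vertical", "align",
--     "start", "end", "auto", "rem", "em", "px",
-- }
--
-- def _is_noise_word(word: str) -> bool: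
--     lower = word.lower()
--     return (lower in {"true", "false"}
--             or lower.startswith("css")
--             or lower in NOISE_SET
--             or len(word) > 24
--             or (len(word) > 4
--                 and any(ch.isdigit() for ch in word)
--                 and any(ch.isalpha() for ch in word)))
--
-- def _filter_company_words(words: list, max_words: int = 6) -> list:
--     if max_words <= 0:
--         return []
--     n = len(words)
--     start = next((i for i, w in enumerate(words) if not _is_noise_word(w)), n)
--     stop = next((i for i in range(start, n) if _is_noise_word(words[i])), n)
--     return words[start:min(stop, start + max_words)]
-- ===== Notes on version B (the rewrite author's own statement) =====
-- stated objective: idiomatic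
-- what changed: Replaced A's stateful accumulator loop with break/continue by an index-based formulation: find the start of the first non-noise run, find where that run ends, and return one slice capped at max_words.
-- intended difference: When max_words <= 0 and words is nonempty, A checks the cap only after appending and so returns a one-element list whenever a non-noise word exists (on all-noise lists both return an empty list), while B returns an empty list, the intended value for a nonpositive cap. — e.g. on _filter_company_words(["acme"], 0): A returns ["acme"], B returns []
import Mathlib
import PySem

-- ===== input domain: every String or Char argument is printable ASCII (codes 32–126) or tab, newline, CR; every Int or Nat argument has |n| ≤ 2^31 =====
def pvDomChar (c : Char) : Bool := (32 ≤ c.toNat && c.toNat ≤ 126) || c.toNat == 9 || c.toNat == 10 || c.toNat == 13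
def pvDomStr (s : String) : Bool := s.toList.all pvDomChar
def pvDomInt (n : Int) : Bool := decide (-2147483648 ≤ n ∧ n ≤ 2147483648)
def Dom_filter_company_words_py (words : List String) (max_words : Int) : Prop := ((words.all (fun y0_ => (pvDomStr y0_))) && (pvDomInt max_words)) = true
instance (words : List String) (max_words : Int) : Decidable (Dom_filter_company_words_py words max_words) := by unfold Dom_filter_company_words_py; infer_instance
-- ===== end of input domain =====

-- B replaces A's stateful accumulator loop (break/continue flag logic) by find-start / find-end
-- indices and one capped slice; idiomatic, same O(n) cost.

-- ===== PORT A =====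
-- Python _is_noise_word as A writes it: an early-return chain of guards
def isNoiseWord (word : String) : Bool :=
  let lower := PySem.Str.lower word
  if lower == "true" || lower == "false" then true
  else if PySem.Str.startswith lower "css" then true
  else if lower == "webkit" || lower == "ms" || lower == "inline" || lower == "block" ||
          lower == "flex" || lower == "display" || lower == "margin" || lower == "padding" ||
          lower == "size" || lower == "color" || lower == "inherit" || lower == "vertical" ||
          lower == "align" || lower == "start" || lower == "end" || lower == "auto" ||
          lower == "rem" || lower == "em" || lower == "px" then true
  else if PySem.Str.len word > 24 then true
  else if PySem.Str.len word > 4 && (word.toList.any PySem.Chars.isdigit) &&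
          (word.toList.any PySem.Chars.isalpha) then true
  else false

-- A's for-loop with its `filtered` accumulator, `continue` and the two `break`s
def filterLoopA (max_words : Int) : List String → List String → List String
  | [], filtered => filtered
  | word :: rest, filtered =>
    if isNoiseWord word then
      if filtered ≠ [] then filtered          -- break
      else filterLoopA max_words rest filtered -- continue
    else
      let filtered := filtered ++ [word]
      if (filtered.length : Int) ≥ max_words then filtered -- break
      else filterLoopA max_words rest filtered

def filter_company_words_py (words : List String) (max_words : Int) : List String :=
  filterLoopA max_words words []

-- ===== PORT B =====
-- Source B's NOISE_SET constant and its single-expression _is_noise_word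
def noiseSetB : List String :=
  ["webkit", "ms", "inline", "block", "flex", "display", "margin",
   "padding", "size", "color", "inherit", "vertical", "align",
   "start", "end", "auto", "rem", "em", "px"]

def isNoiseWordB (word : String) : Bool :=
  let lower := PySem.Str.lower word
  (lower == "true" || lower == "false")
    || PySem.Str.startswith lower "css"
    || noiseSetB.contains lower
    || PySem.Str.len word > 24
    || (PySem.Str.len word > 4 && (word.toList.any PySem.Chars.isdigit) &&
        (word.toList.any PySem.Chars.isalpha))

def filter_company_words_py_alt (words : List String) (max_words : Int) : List String :=
  if max_words ≤ 0 then []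
  else
    let n : Int := (words.length : Int)
    let start : Int := ((words.findIdx (fun w => !isNoiseWordB w)) : Int)  -- next(..., n)
    let stop : Int := start + (((words.drop start.toNat).findIdx isNoiseWordB) : Int) -- next over range(start, n)
    let _ := n
    PySem.List.slice words (some start) (some (min stop (start + max_words)))

-- ===== PRECONDITION & SPEC =====
-- When max_words ≤ 0 and words is nonempty, A checks the cap only after appending, so it
-- still returns a one-element list whenever the list contains a non-noise word, while B
-- returns an empty list, the intended value for a nonpositive word cap (on all-noise lists
-- both return an empty list).
def D_filter_company_words_py (words : List String) (max_words : Int) : Prop :=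
  max_words ≤ 0 ∧ words ≠ []
instance (words : List String) (max_words : Int) : Decidable (D_filter_company_words_py words max_words) := by unfold D_filter_company_words_py; infer_instance

def Spec_filter_company_words_py (words : List String) (max_words : Int) (out : List String) : Prop :=
  ¬ D_filter_company_words_py words max_words → out = filter_company_words_py_alt words max_words
instance (words : List String) (max_words : Int) (out : List String) : Decidable (Spec_filter_company_words_py words max_words out) := by unfold Spec_filter_company_words_py; infer_instance

def pvDiffWitness_filter_company_words_py : List String × Int := (["acme"], 0)
def pvDiffWitnessOut_filter_company_words_py : (List String) × (List String) := (["acme"], [])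

-- ===== CLAIM (what is proved, stated in full; the proofs are below) =====
def Claim_unchanged_filter_company_words_py : Prop := ∀ (words : List String) (max_words : Int), Dom_filter_company_words_py words max_words → Spec_filter_company_words_py words max_words (filter_company_words_py words max_words)
def Claim_changed_filter_company_words_py : Prop := Dom_filter_company_words_py (pvDiffWitness_filter_company_words_py.1) (pvDiffWitness_filter_company_words_py.2) ∧ D_filter_company_words_py (pvDiffWitness_filter_company_words_py.1) (pvDiffWitness_filter_company_words_py.2) ∧ filter_company_words_py (pvDiffWitness_filter_company_words_py.1) (pvDiffWitness_filter_company_words_py.2) = pvDiffWitnessOut_filter_company_words_py.1 ∧ filter_company_words_py_alt (pvDiffWitness_filter_company_words_py.1) (pvDiffWitness_filter_company_words_py.2) = pvDiffWitnessOut_filter_company_words_py.2 ∧ pvDiffWitnessOut_filter_company_words_py.1 ≠ pvDiffWitnessOut_filter_company_words_py.2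

-- ===== LEMMAS AND PROOFS =====

-- Source B's helper equals A's helper
set_option maxHeartbeats 1000000 in
theorem isNoiseWordB_eq (w : String) : isNoiseWordB w = isNoiseWord w := by
  unfold isNoiseWordB isNoiseWord
  simp only [noiseSetB, List.contains_cons, List.contains_nil, Bool.or_false, Bool.or_assoc]
  split_ifs with h1 h2 h3 h4 h5
  · simp only [Bool.or_eq_true] at h1
    rcases h1 with h|h <;> simp only [h, Bool.or_true, Bool.true_or]
  · simp only [h2, Bool.or_true, Bool.true_or]
  · simp only [Bool.or_eq_true, or_assoc] at h3
    rcases h3 with h|h|h|h|h|h|h|h|h|h|h|h|h|h|h|h|h|h|h <;>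
      simp only [h, Bool.or_true, Bool.true_or]
  · simp only [h4, decide_true, Bool.or_true, Bool.true_or]
  · simp only [h5, Bool.or_true]
  · simp only [Bool.or_eq_true, not_or, Bool.not_eq_true] at h1 h3
    simp_all
    exact h5

-- reference form of the collection phase: take non-noise words until a noise word or the cap
def takeCap (max_words : Int) : List String → List String
  | [] => []
  | w :: ws => if isNoiseWord w then []
               else if max_words ≤ 1 then [w]
               else w :: takeCap (max_words - 1) ws

theorem filterLoopA_acc (max_words : Int) (ws : List String) :
    ∀ filtered, filtered ≠ [] → (filtered.length : Int) < max_words →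
      filterLoopA max_words ws filtered = filtered ++ takeCap (max_words - filtered.length) ws := by
  induction ws with
  | nil => intro f hf hlt; simp [filterLoopA, takeCap]
  | cons w ws ih =>
    intro f hf hlt
    have hlen : (((f ++ [w]).length : Int)) = (f.length : Int) + 1 := by
      simp
    by_cases hn : isNoiseWord w
    · simp [filterLoopA, takeCap, hn, hf]
    · rw [takeCap]
      simp only [filterLoopA, hn, Bool.false_eq_true, if_false]
      by_cases hcap : ((f ++ [w]).length : Int) ≥ max_words
      · have h1 : max_words - (f.length : Int) ≤ 1 := by omega
        rw [if_pos hcap, if_pos h1]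
      · have h1 : ¬ (max_words - (f.length : Int) ≤ 1) := by push_cast at hcap ⊢; omega
        rw [if_neg hcap, if_neg h1,
            ih (f ++ [w]) (by simp) (by omega)]
        have h2 : max_words - ((f ++ [w]).length : Int) = max_words - (f.length : Int) - 1 := by
          omega
        rw [h2]
        simp

theorem filterLoopA_nil (max_words : Int) (ws : List String) :
    filterLoopA max_words ws [] = takeCap max_words (ws.dropWhile isNoiseWord) := by
  induction ws with
  | nil => simp [filterLoopA, takeCap]
  | cons w ws ih =>
    by_cases hn : isNoiseWord w
    · simpa [filterLoopA, hn, List.dropWhile_cons, hn] using ih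
    · rw [List.dropWhile_cons, if_neg (by simp [hn]), takeCap]
      simp only [filterLoopA, hn, Bool.false_eq_true, if_false, List.nil_append]
      by_cases hcap : ((([w] : List String)).length : Int) ≥ max_words
      · have h1 : max_words ≤ 1 := by simpa using hcap
        rw [if_pos hcap, if_pos h1]
      · have h1 : ¬ max_words ≤ 1 := by simp at hcap ⊢; omega
        have hlt : (([w] : List String).length : Int) < max_words := by simp at hcap ⊢; omega
        rw [if_neg (not_le.mpr hlt), if_neg h1,
            filterLoopA_acc max_words ws [w] (by simp) hlt]
        simp

theorem takeCap_eq_take (max_words : Int) (hm : 1 ≤ max_words) (ws : List String) :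
    takeCap max_words ws = ws.take (min (ws.findIdx isNoiseWord) max_words.toNat) := by
  induction ws generalizing max_words with
  | nil => simp [takeCap]
  | cons w ws ih =>
    by_cases hn : isNoiseWord w
    · simp [takeCap, hn, List.findIdx_cons]
    · rw [takeCap]
      simp only [hn, Bool.false_eq_true, if_false, List.findIdx_cons, cond_false]
      by_cases h1 : max_words ≤ 1
      · have : max_words = 1 := le_antisymm h1 hm
        subst this
        simp [List.take_succ_cons]
      · have h2 : 1 ≤ max_words - 1 := by omega
        have hmin : min (ws.findIdx isNoiseWord + 1) max_words.toNat
            = (min (ws.findIdx isNoiseWord) (max_words - 1).toNat) + 1 := by omega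
        rw [if_neg h1, ih (max_words - 1) h2, hmin]
        simp [List.take_succ_cons]

theorem findIdx_not_drop (ws : List String) :
    ws.drop (ws.findIdx (fun w => !isNoiseWord w)) = ws.dropWhile isNoiseWord := by
  induction ws with
  | nil => simp
  | cons w ws ih =>
    by_cases hn : isNoiseWord w
    · simpa [List.findIdx_cons, hn] using ih
    · simp [List.findIdx_cons, hn, List.dropWhile_cons]

-- B's slice, rewritten as take over the dropWhile part (for 1 ≤ max_words)
theorem alt_eq (words : List String) (max_words : Int) (h : 1 ≤ max_words) :
    filter_company_words_py_alt words max_words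
      = (words.dropWhile isNoiseWord).take
          (min ((words.dropWhile isNoiseWord).findIdx isNoiseWord) max_words.toNat) := by
  have hBA : isNoiseWordB = isNoiseWord := funext isNoiseWordB_eq
  unfold filter_company_words_py_alt
  rw [if_neg (by omega), hBA]
  dsimp only
  set j : Nat := words.findIdx (fun w => !isNoiseWord w) with hj
  set k : Nat := (words.drop j).findIdx isNoiseWord with hk
  have hjt : ((j : Int)).toNat = j := by simp
  have hmin : min ((j : Int) + (k : Int)) ((j : Int) + max_words) = (j : Int) + min (k : Int) max_words := by omega
  have heq : (j : Int) + min (k : Int) max_words = (j : Int) + ((min (k : Int) max_words).toNat : Int) := by omega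
  rw [hjt, hmin, heq]
  have := PySem.List.slice_natCast_add words j (min (k : Int) max_words).toNat
  rw [this]
  rw [findIdx_not_drop] at hk ⊢
  have : (min (k : Int) max_words).toNat = min k max_words.toNat := by omega
  rw [this, hk]

-- ===== VERDICT (by name: the statement is the Claim_ definition above) =====
theorem filter_company_words_py_spec : Claim_unchanged_filter_company_words_py := by
  intro words max_words _ hnD
  by_cases h : 1 ≤ max_words
  · unfold filter_company_words_py
    rw [filterLoopA_nil max_words, takeCap_eq_take max_words h, alt_eq words max_words h]
  · have hle : max_words ≤ 0 := by omega
    have hnil : words = [] := by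
      by_contra hc
      exact hnD ⟨hle, hc⟩
    subst hnil
    simp [filter_company_words_py, filterLoopA, filter_company_words_py_alt, hle]

theorem filter_company_words_py_changed : Claim_changed_filter_company_words_py := by
  unfold Claim_changed_filter_company_words_py; decide
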